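-- pv_equiv track=rewrite | github.com/Zahidsqldba07/hackerank-3-month-prep | week5/8.sansa-and-xor.py | sansaXor
-- ===== SOURCE A (Python) =====
-- def sansaXor(arr: list[int]) -> int:
--     if len(arr) % 2 == 0:
--         return 0
--     else:
--         sum_xor = 0
--         for i in range(0, len(arr), 2):
--             sum_xor ^= arr[i]
--         return sum_xor
-- ===== SOURCE B (Python) =====
-- def sansaXor(arr: list[int]) -> int:
--     n = len(arr)
--     acc = 0
--     for i in range(n):
--         if ((i + 1) * (n - i)) % 2 == 1:
--             acc ^= arr[i]
--     return acc
-- ===== Notes on version B (the rewrite author's own statement) =====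
-- stated objective: alternative
-- what changed: B derives the answer from the subarray-occurrence count: one uniform pass over all indices XORing arr[i] whenever (i+1)*(n-i) is odd, with no length-parity early return and no step-2 stride.
import Mathlib
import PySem

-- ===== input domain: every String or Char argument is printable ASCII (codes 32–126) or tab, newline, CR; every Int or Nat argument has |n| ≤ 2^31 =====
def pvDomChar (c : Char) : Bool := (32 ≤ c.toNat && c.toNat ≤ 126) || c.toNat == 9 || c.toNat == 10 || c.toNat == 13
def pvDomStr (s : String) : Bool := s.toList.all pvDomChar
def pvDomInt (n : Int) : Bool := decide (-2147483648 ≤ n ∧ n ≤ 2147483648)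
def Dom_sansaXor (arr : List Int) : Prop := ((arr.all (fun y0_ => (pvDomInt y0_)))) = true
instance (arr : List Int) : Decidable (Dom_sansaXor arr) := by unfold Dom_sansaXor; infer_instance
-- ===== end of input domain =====

-- B replaces A's length-parity early return plus step-2 stride by one uniform pass over all
-- indices that XORs arr[i] in whenever its subarray-occurrence count (i+1)*(n-i) is odd.


-- ===== PORT A =====
def sansaXor (arr : List Int) : Int :=
  if PySem.Int.mod (arr.length : Int) 2 = 0 then 0
  else
    (PySem.List.pyRange 0 (arr.length : Int) 2).foldl
      (fun sum_xor i => PySem.Int.bxor sum_xor (PySem.List.pyGetD arr i 0)) 0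

-- ===== PORT B =====
def sansaXor_alt (arr : List Int) : Int :=
  (PySem.List.pyRange 0 (arr.length : Int) 1).foldl
    (fun acc i =>
      if PySem.Int.mod ((i + 1) * ((arr.length : Int) - i)) 2 = 1 then
        PySem.Int.bxor acc (PySem.List.pyGetD arr i 0)
      else acc) 0

-- ===== PRECONDITION & SPEC =====
def Spec_sansaXor (arr : List Int) (out : Int) : Prop := out = sansaXor_alt arr
instance (arr : List Int) (out : Int) : Decidable (Spec_sansaXor arr out) := by unfold Spec_sansaXor; infer_instance

-- ===== CLAIM (what is proved, stated in full; the proofs are below) =====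
def Claim_equal_sansaXor : Prop := ∀ (arr : List Int), Dom_sansaXor arr → Spec_sansaXor arr (sansaXor arr)

-- ===== LEMMAS AND PROOFS =====

-- parity of the subarray count: (i+1)*(N-i) is odd iff i is even and N is odd
theorem pv_cond_iff (N i : Int) :
    (PySem.Int.mod ((i + 1) * (N - i)) 2 = 1) ↔ (i % 2 = 0 ∧ N % 2 = 1) := by
  rw [PySem.Int.mod_eq_emod_of_pos (by norm_num), Int.mul_emod]
  rcases Int.emod_two_eq i with hi | hi <;> rcases Int.emod_two_eq N with hN | hN
  · rw [show (i + 1) % 2 = 1 from by omega, show (N - i) % 2 = 0 from by omega]; simp [hi, hN]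
  · rw [show (i + 1) % 2 = 1 from by omega, show (N - i) % 2 = 1 from by omega]; simp [hi, hN]
  · rw [show (i + 1) % 2 = 0 from by omega, show (N - i) % 2 = 1 from by omega]; simp [hi, hN]
  · rw [show (i + 1) % 2 = 0 from by omega, show (N - i) % 2 = 0 from by omega]; simp [hi, hN]

theorem pv_foldl_id {α : Type} (l : List α) (init : Int) :
    l.foldl (fun acc (_ : α) => acc) init = init := by
  induction l <;> simp [*]

-- closed form for range(0, n, 2)
theorem pv_range2 (n : Nat) :
    PySem.List.pyRange 0 (n : Int) 2 = (List.range ((n + 1) / 2)).map (fun k : Nat => 2 * (k : Int)) := by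
  rw [PySem.List.pyRange_of_pos 0 (n : Int) (by norm_num)]
  rcases Nat.eq_zero_or_pos n with h | h
  · simp [h]
  · rw [if_pos (by exact_mod_cast h),
      show ((((n : Int) - 0 + 2 - 1) / 2).toNat) = (n + 1) / 2 from by omega]
    simp only [zero_add]

-- step-2 fold equals the even-filtered step-1 fold
theorem pv_fold_even (g : Int → Int) (n : Nat) (init : Int) :
    (PySem.List.pyRange 0 (n : Int) 1).foldl
        (fun acc i => if i % 2 = 0 then PySem.Int.bxor acc (g i) else acc) init
      = (PySem.List.pyRange 0 (n : Int) 2).foldl (fun acc i => PySem.Int.bxor acc (g i)) init := by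
  induction n with
  | zero =>
    rw [show ((0 : Nat) : Int) = 0 from rfl,
      PySem.List.pyRange_of_pos (0 : Int) 0 (by norm_num : (0:Int) < 2)]
    simp
  | succ m ih =>
    rw [show ((m + 1 : Nat) : Int) = (m : Int) + 1 from by push_cast; ring,
      PySem.List.pyRange_one_succ_right (by positivity), List.foldl_append,
      show ((m : Int) + 1) = ((m + 1 : Nat) : Int) from by push_cast; ring,
      pv_range2 (m + 1)]
    simp only [List.foldl_cons, List.foldl_nil]
    rcases Nat.even_or_odd m with he | ho
    · rcases he with ⟨t, rfl⟩
      rw [if_pos (by omega), ih, pv_range2 (t + t),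
        show (t + t + 1 + 1) / 2 = (t + t + 1) / 2 + 1 from by omega, List.range_succ,
        List.map_append, List.foldl_append]
      simp only [List.map_cons, List.map_nil, List.foldl_cons, List.foldl_nil]
      congr 2
      omega
    · rcases ho with ⟨t, rfl⟩
      rw [if_neg (by omega), ih, pv_range2 (2 * t + 1),
        show (2 * t + 1 + 1 + 1) / 2 = (2 * t + 1 + 1) / 2 from by omega]

theorem sansaXor_eq_alt (arr : List Int) : sansaXor arr = sansaXor_alt arr := by
  unfold sansaXor sansaXor_alt
  have hmod : PySem.Int.mod ((arr.length : Int)) 2 = (arr.length : Int) % 2 :=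
    PySem.Int.mod_eq_emod_of_pos (by norm_num)
  rcases Int.emod_two_eq ((arr.length : Int)) with hN | hN
  · rw [if_pos (by rw [hmod, hN])]
    rw [PySem.List.foldl_congr_mem _ _ (fun acc (_ : Int) => acc) 0
      (by intro acc i _
          rw [if_neg]
          rw [pv_cond_iff]
          simp [hN])]
    rw [pv_foldl_id]
  · rw [if_neg (by rw [hmod, hN]; norm_num)]
    have hB := PySem.List.foldl_congr_mem (PySem.List.pyRange 0 ((arr.length : Int)) 1)
      (fun acc i =>
        if PySem.Int.mod ((i + 1) * ((arr.length : Int) - i)) 2 = 1 then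
          PySem.Int.bxor acc (PySem.List.pyGetD arr i 0)
        else acc)
      (fun acc i => if i % 2 = 0 then PySem.Int.bxor acc (PySem.List.pyGetD arr i 0) else acc) 0
      (by intro acc i _
          by_cases hi : i % 2 = 0
          · simp only [if_pos hi, if_pos ((pv_cond_iff (arr.length : Int) i).2 ⟨hi, hN⟩)]
          · simp only [if_neg hi,
              if_neg (fun hc => hi ((pv_cond_iff (arr.length : Int) i).1 hc).1)])
    rw [hB]
    exact (pv_fold_even (fun i => PySem.List.pyGetD arr i 0) arr.length 0).symm

-- ===== VERDICT (by name: the statement is the Claim_ definition above) =====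
theorem sansaXor_spec : Claim_equal_sansaXor := by
  intro arr _
  unfold Spec_sansaXor
  exact sansaXor_eq_alt arr
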